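-- pv_equiv track=rewrite | github.com/kakashiisawesome/Elements-of-Programming-Interviews-in-Python | Arrays/CompareStrings.py | numSmallerByFrequency
-- ===== SOURCE A (Python) =====
-- def numSmallerByFrequency(queries, words):
--     answer = []
--     fq = []
--     fw = []
--
--     for q in queries:
--         fq.append(f(q))
--
--     for w in words:
--         fw.append(f(w))
--
--     fw.sort()
--     memo = {}
--     for i in fq:
--         j = 0
--         if i not in memo:
--             while j < len(fw) and fw[j] <= i:
--                 j += 1
--             memo[i] = len(fw) - j
--
--         answer.append(memo[i])
--
--
--
--     # for q in queries:
--     #     num = 0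
--     #     fq = f(q)
--     #     for w in words:
--     #         if f(w) > fq:
--     #             num += 1
--     #     answer.append(num)
--
--     return answer
--
-- def f(s):
--     a = sorted(s)
--     count = 0
--     i = 0
--     while i < len(a) and a[i] == a[0]:
--         count += 1
--         i += 1
--
--     return count
-- ===== SOURCE B (Python) =====
-- def f(s):
--     if not s:
--         return 0
--     return s.count(min(s))
--
--
-- def numSmallerByFrequency(queries, words):
--     fw = sorted(f(w) for w in words)
--     n = len(fw)
--     answer = []
--     for q in queries:
--         x = f(q)
--         # bisect_right(fw, x), hand-written (bisect may not be imported here)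
--         lo, hi = 0, n
--         while lo < hi:
--             mid = (lo + hi) // 2
--             if x < fw[mid]:
--                 hi = mid
--             else:
--                 lo = mid + 1
--         answer.append(n - lo)
--     return answer
-- ===== Notes on version B (the rewrite author's own statement) =====
-- stated objective: alternative
-- what changed: B replaces A's per-query linear scan (memoised in a dict) over the sorted f-values by a hand-written bisect_right binary search per query, and computes f(s) as the count of min(s) instead of sorting each string; the trade is O(log W) search per query without any memo dict versus A's O(W) scan amortised by memoisation.
import Mathlib
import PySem

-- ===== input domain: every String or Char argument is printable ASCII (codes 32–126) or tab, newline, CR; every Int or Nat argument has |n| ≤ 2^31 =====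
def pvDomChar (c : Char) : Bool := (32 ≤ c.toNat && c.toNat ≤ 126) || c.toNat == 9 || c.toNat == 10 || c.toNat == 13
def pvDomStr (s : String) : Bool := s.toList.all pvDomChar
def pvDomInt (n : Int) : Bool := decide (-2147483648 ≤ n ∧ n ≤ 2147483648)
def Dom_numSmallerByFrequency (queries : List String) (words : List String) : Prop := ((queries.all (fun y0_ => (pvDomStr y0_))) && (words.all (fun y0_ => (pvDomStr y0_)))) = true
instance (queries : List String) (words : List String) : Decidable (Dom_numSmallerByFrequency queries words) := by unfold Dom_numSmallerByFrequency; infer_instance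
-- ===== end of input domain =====

-- Alternative algorithm: B answers each query by a bisect_right binary search on the sorted
-- f-values (no memo dict) and computes f(s) as the count of min(s) instead of sorting s.

-- ===== PORT A =====

-- f(s): a = sorted(s); while i < len(a) and a[i] == a[0]: count += 1; i += 1
def pvFAgo (a : List Char) (i : Nat) (count : Nat) : Nat :=
  if h : i < a.length then
    if a[i] = a[0]'(Nat.lt_of_le_of_lt (Nat.zero_le i) h) then pvFAgo a (i + 1) (count + 1)
    else count
  else count
termination_by a.length - i

def pvFA (s : String) : Int :=
  let a := PySem.List.sorted s.toList (fun c => c)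
  (pvFAgo a 0 0 : Int)

-- the inner 'while j < len(fw) and fw[j] <= i: j += 1' loop of A
def pvWhileJ (fw : List Int) (i : Int) (j : Nat) : Nat :=
  if h : j < fw.length then
    if fw[j] ≤ i then pvWhileJ fw i (j + 1) else j
  else j
termination_by fw.length - j

def numSmallerByFrequency (queries : List String) (words : List String) : List Int :=
  let fq := queries.foldl (fun acc q => acc ++ [pvFA q]) []
  let fw0 := words.foldl (fun acc w => acc ++ [pvFA w]) []
  let fw := PySem.List.sorted fw0 (fun x => x)
  (fq.foldl
    (fun (st : List Int × PySem.Dict Int Int) i =>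
      let memo := if st.2.contains i then st.2
                  else st.2.insert i ((fw.length : Int) - (pvWhileJ fw i 0 : Int))
      -- memo[i] is always present here, so the Python lookup cannot raise; getD 0 is exact
      (st.1 ++ [memo.getD i 0], memo))
    ([], PySem.Dict.empty)).1

-- ===== PORT B =====

-- f(s): s.count(min(s))   (min(s) over a nonempty string = running-min fold; s.count of the
-- 1-char string min(s) is PySem.Chars.count with that single-char needle)
def pvFB (s : String) : Int :=
  match s.toList with
  | [] => 0
  | c :: t => (PySem.Chars.count (c :: t) [t.foldl min c] : Int)

-- Source B's hand-written loop 'lo, hi = 0, n; while lo < hi: mid = (lo+hi)//2; if x < fw[mid]: hi = mid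
-- else: lo = mid+1' is step for step PySem.List.bisectRight's loop (same mid, same comparison, same updates).
def numSmallerByFrequency_alt (queries : List String) (words : List String) : List Int :=
  let fw := PySem.List.sorted (words.map pvFB) (fun x => x)
  queries.map (fun q => (fw.length : Int) - (PySem.List.bisectRight fw (pvFB q) : Int))

-- ===== PRECONDITION & SPEC =====
def Spec_numSmallerByFrequency (queries : List String) (words : List String) (out : List Int) : Prop := out = numSmallerByFrequency_alt queries words
instance (queries : List String) (words : List String) (out : List Int) : Decidable (Spec_numSmallerByFrequency queries words out) := by unfold Spec_numSmallerByFrequency; infer_instance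

-- ===== CLAIM (what is proved, stated in full; the proofs are below) =====
def Claim_equal_numSmallerByFrequency : Prop := ∀ (queries : List String) (words : List String), Dom_numSmallerByFrequency queries words → Spec_numSmallerByFrequency queries words (numSmallerByFrequency queries words)

-- ===== LEMMAS AND PROOFS =====

-- on a sorted list whose elements all dominate a0, the head-equal prefix has length = count of a0
lemma pv_tw_count {α : Type} [LinearOrder α] [BEq α] [LawfulBEq α] (a0 : α) :
    ∀ l : List α, (∀ x ∈ l, a0 ≤ x) → l.Pairwise (· ≤ ·) →
      (l.takeWhile (fun x => decide (x = a0))).length = l.count a0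
  | [], _, _ => by simp
  | x :: t, hmin, hp => by
      rcases List.pairwise_cons.mp hp with ⟨hxt, hpt⟩
      by_cases hx : x = a0
      · subst hx
        have ih := pv_tw_count x t (fun y hy => hxt y hy) hpt
        simp [List.count_cons_self, ih]
      · have hlt : a0 < x := lt_of_le_of_ne (hmin x (List.mem_cons_self)) (Ne.symm hx)
        have hz : (x :: t).count a0 = 0 := by
          rw [List.count_eq_zero]
          intro hmem
          rcases List.mem_cons.mp hmem with rfl | hmem
          · exact absurd rfl (ne_of_gt hlt)
          · exact absurd rfl (ne_of_gt (lt_of_lt_of_le hlt (hxt a0 hmem)))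
        simp [hx, hz]

-- pvFAgo unwound: it adds the length of the maximal head-equal block from index i
lemma pvFAgo_eq (a0 : Char) (rest : List Char) :
    ∀ (d i count : Nat), (a0 :: rest).length - i ≤ d →
      pvFAgo (a0 :: rest) i count
        = count + (((a0 :: rest).drop i).takeWhile (fun x => decide (x = a0))).length := by
  intro d
  induction d with
  | zero =>
      intro i count hd
      have hle : (a0 :: rest).length ≤ i := by omega
      rw [pvFAgo, dif_neg (by omega), List.drop_of_length_le hle]
      simp
  | succ d ih =>
      intro i count hd
      rw [pvFAgo]
      by_cases h : i < (a0 :: rest).length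
      · rw [dif_pos h]
        have hdrop := List.drop_eq_getElem_cons h
        by_cases he : (a0 :: rest)[i] = a0
        · rw [if_pos (by simpa using he), ih (i + 1) (count + 1) (by omega), hdrop]
          simp [he]
          omega
        · rw [if_neg (by simpa using he), hdrop]
          simp [he]
      · rw [dif_neg h, List.drop_of_length_le (by omega)]
        simp

-- Python's s.count(m) with a single character m is plain character counting
lemma pv_count_go_single (m : Char) :
    ∀ (fuel : Nat) (l : List Char) (acc : Nat), l.length ≤ fuel →
      PySem.Chars.count.go [m] fuel l acc = acc + l.count m := by
  intro fuel
  induction fuel with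
  | zero =>
      intro l acc h
      have : l = [] := List.eq_nil_of_length_eq_zero (by omega)
      subst this
      simp [PySem.Chars.count.go]
  | succ f ih =>
      intro l acc h
      cases l with
      | nil => simp [PySem.Chars.count.go]
      | cons c t =>
          rw [PySem.Chars.count.go]
          by_cases hc : c = m
          · have hpre : List.isPrefixOf [m] (c :: t) = true := by simp [List.isPrefixOf, hc]
            rw [if_pos hpre]
            have hdrop : List.drop (([m] : List Char)).length (c :: t) = t := by simp
            rw [hdrop, ih t (acc + 1) (by simp at h; omega), hc, List.count_cons_self]
            omega
          · have hpre : ¬ List.isPrefixOf [m] (c :: t) = true := by simp [List.isPrefixOf]; exact fun h' => hc h'.symm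
            rw [if_neg hpre, ih t acc (by simpa using Nat.le_of_succ_le_succ (by simpa using h))]
            rw [List.count_cons_of_ne (by simpa using hc)]

lemma pv_count_single (m : Char) (l : List Char) :
    PySem.Chars.count l [m] = l.count m := by
  simp only [PySem.Chars.count, List.isEmpty_cons, Bool.false_eq_true, if_false]
  rw [pv_count_go_single m l.length l 0 (le_refl _), Nat.zero_add]

-- the two f's agree: counting the head-equal prefix of sorted(s) = counting min(s) in s
lemma pvF_eq (s : String) : pvFA s = pvFB s := by
  rcases hcs : s.toList with _ | ⟨c, t⟩
  · have hnil : PySem.List.sorted ([] : List Char) (fun c => c) = [] :=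
      (PySem.List.sorted_eq_nil_iff _ _ _).mpr rfl
    have hgo : pvFAgo ([] : List Char) 0 0 = 0 := by
      rw [pvFAgo]; simp
    simp [pvFA, pvFB, hcs, hnil, hgo]
  · have hA : pvFA s = (pvFAgo (PySem.List.sorted (c :: t) (fun c => c)) 0 0 : Int) := by
      simp [pvFA, hcs]
    have hB : pvFB s = (PySem.Chars.count (c :: t) [t.foldl min c] : Int) := by
      simp [pvFB, hcs]
    rw [hA, hB]
    set a := PySem.List.sorted (c :: t) (fun c => c) with ha
    obtain ⟨a0, rest, hae⟩ : ∃ a0 rest, a = a0 :: rest := by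
      cases h' : a with
      | nil => exact absurd ((PySem.List.sorted_eq_nil_iff _ _ _).mp h') (by simp)
      | cons x xs => exact ⟨x, xs, rfl⟩
    have hperm : a.Perm (c :: t) := PySem.List.sorted_perm _ _ _
    have hpair : a.Pairwise (· ≤ ·) := by
      simpa using PySem.List.sorted_pairwise (c :: t) (fun c => c)
    have hmin_a : ∀ x ∈ a, a0 ≤ x := by
      rw [hae] at hpair ⊢
      intro x hx
      rcases List.mem_cons.mp hx with rfl | hx
      · exact le_refl x
      · exact (List.pairwise_cons.mp hpair).1 x hx
    have h1 : pvFAgo a 0 0 = a.count a0 := by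
      rw [hae, pvFAgo_eq a0 rest (a0 :: rest).length 0 0 (by omega)]
      simp only [List.drop_zero, Nat.zero_add]
      exact pv_tw_count a0 (a0 :: rest) (hae ▸ hmin_a) (hae ▸ hpair)
    set m := t.foldl min c with hm
    have hmmem : m ∈ c :: t := by
      rcases PySem.List.foldl_min_mem t c with h | h
      · rw [hm, h]; exact List.mem_cons_self
      · exact List.mem_cons_of_mem c h
    have hmle : ∀ y ∈ c :: t, m ≤ y := by
      intro y hy
      rcases List.mem_cons.mp hy with rfl | hy
      · exact (PySem.List.foldl_min_le t y).1
      · exact (PySem.List.foldl_min_le t c).2 y hy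
    have ha0mem : a0 ∈ c :: t := (PySem.List.mem_sorted _ _ _ _).mp (hae ▸ List.mem_cons_self)
    have ha0m : a0 = m :=
      le_antisymm (hmin_a m ((PySem.List.mem_sorted _ _ _ _).mpr hmmem)) (hmle a0 ha0mem)
    rw [pv_count_single m (c :: t), h1, hperm.count_eq a0, ha0m]

-- A's linear scan over the sorted list lands exactly on bisect_right
lemma pvWhileJ_eq (fw : List Int) (x : Int) (hs : fw.Pairwise (· ≤ ·)) :
    ∀ (d j : Nat), fw.length - j ≤ d → j ≤ PySem.List.bisectRight fw x →
      pvWhileJ fw x j = PySem.List.bisectRight fw x := by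
  obtain ⟨hrle, hlt, hgt⟩ := PySem.List.bisectRight_spec fw x hs
  intro d
  induction d with
  | zero =>
      intro j hd hj
      rw [pvWhileJ, dif_neg (by omega)]
      omega
  | succ d ih =>
      intro j hd hj
      rw [pvWhileJ]
      by_cases h : j < fw.length
      · rw [dif_pos h]
        by_cases hle : fw[j] ≤ x
        · rw [if_pos hle]
          have hjr : j < PySem.List.bisectRight fw x := by
            by_contra hcon
            exact absurd (hgt j h (by omega)) (by omega)
          exact ih (j + 1) (by omega) (by omega)
        · rw [if_neg hle]
          rcases Nat.lt_or_ge j (PySem.List.bisectRight fw x) with hjr | hjr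
          · exact absurd (hlt j h hjr) hle
          · omega
      · rw [dif_neg h]
        omega

-- A's memo loop yields the plain map: every stored value is the recomputable one
lemma pv_fold_memo (fw : List Int) :
    ∀ (l : List Int) (acc : List Int) (memo : PySem.Dict Int Int),
      (∀ k : Int, memo.contains k = true →
          memo.getD k 0 = (fw.length : Int) - (pvWhileJ fw k 0 : Int)) →
      (l.foldl
        (fun (st : List Int × PySem.Dict Int Int) i =>
          let memo := if st.2.contains i then st.2
                      else st.2.insert i ((fw.length : Int) - (pvWhileJ fw i 0 : Int))
          (st.1 ++ [memo.getD i 0], memo)) (acc, memo)).1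
        = acc ++ l.map (fun i => (fw.length : Int) - (pvWhileJ fw i 0 : Int))
  | [], acc, memo, _ => by simp
  | i :: t, acc, memo, hinv => by
      simp only [List.foldl_cons, List.map_cons]
      by_cases hc : memo.contains i = true
      · rw [if_pos hc, pv_fold_memo fw t (acc ++ [memo.getD i 0]) memo hinv, hinv i hc,
          List.append_assoc]
        rfl
      · rw [if_neg hc]
        set memo' := memo.insert i ((fw.length : Int) - (pvWhileJ fw i 0 : Int)) with hmemo'
        have hinv' : ∀ k : Int, memo'.contains k = true →
            memo'.getD k 0 = (fw.length : Int) - (pvWhileJ fw k 0 : Int) := by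
          intro k hk
          rw [hmemo', PySem.Dict.getD_insert]
          by_cases hki : k = i
          · rw [if_pos hki, hki]
          · rw [if_neg hki]
            rw [hmemo', PySem.Dict.contains_insert] at hk
            simp only [Bool.or_eq_true, beq_iff_eq] at hk
            exact hinv k (hk.resolve_left hki)
        rw [pv_fold_memo fw t (acc ++ [memo'.getD i 0]) memo' hinv',
          hmemo', PySem.Dict.getD_insert_self, List.append_assoc]
        rfl

-- ===== VERDICT (by name: the statement is the Claim_ definition above) =====
theorem numSmallerByFrequency_spec : Claim_equal_numSmallerByFrequency := by
  intro queries words _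
  unfold Spec_numSmallerByFrequency numSmallerByFrequency numSmallerByFrequency_alt
  have hF : pvFA = pvFB := funext pvF_eq
  simp only [PySem.List.foldl_append_singleton_eq_map, List.nil_append, hF]
  set fw := PySem.List.sorted (words.map pvFB) (fun x => x) with hfw
  have hs : fw.Pairwise (· ≤ ·) := by
    simpa using PySem.List.sorted_pairwise (words.map pvFB) (fun x => x)
  rw [pv_fold_memo fw (queries.map pvFB) [] PySem.Dict.empty
      (by intro k hk; rw [PySem.Dict.contains_empty] at hk; cases hk)]
  simp only [List.nil_append, List.map_map]
  refine List.map_congr_left ?_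
  intro q _
  simp only [Function.comp]
  rw [pvWhileJ_eq fw (pvFB q) hs fw.length 0 (by omega) (Nat.zero_le _)]
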